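-- pv_equiv track=rewrite | github.com/olsenw/LeetCodeExercises | Python3/minimum_difference_in_sums_after_removal_of_elements.py | minimumDifference_brute
-- ===== SOURCE A (Python) =====
-- from typing import List, Dict, Set, Optional
--
-- def minimumDifference_brute(nums: List[int]) -> int:
--     n = len(nums) // 3
--     answer = float('inf')
--     for i in range(n, 2*n+1):
--         a = sum(sorted(nums[:i])[:n])
--         b = sum(sorted(nums[i:],reverse=True)[:n])
--         answer = min(answer, a - b)
--     return answer
-- ===== SOURCE B (Python) =====
-- def _insert_sorted(xs, x):
--     # insert x into ascending-sorted xs, keeping it sorted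
--     for k in range(len(xs)):
--         if x < xs[k]:
--             return xs[:k] + [x] + xs[k:]
--     return xs + [x]
--
--
-- def _top_sum(cur, n):
--     # sum of the n largest elements of the ascending-sorted list cur
--     return sum(cur[len(cur) - n:])
--
--
-- def minimumDifference_brute(nums):
--     n = len(nums) // 3
--     # one incremental insertion pass from the left: cur stays sorted(prefix)
--     cur = []
--     for x in nums[:n]:
--         cur = _insert_sorted(cur, x)
--     pre = []
--     for x in nums[n:2 * n]:
--         pre.append(sum(cur[:n]))
--         cur = _insert_sorted(cur, x)
--     pre.append(sum(cur[:n]))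
--     # one incremental insertion pass from the right: cur stays sorted(suffix)
--     cur = []
--     for x in reversed(nums[2 * n:]):
--         cur = _insert_sorted(cur, x)
--     sufr = [_top_sum(cur, n)]
--     for x in reversed(nums[n:2 * n]):
--         cur = _insert_sorted(cur, x)
--         sufr.append(_top_sum(cur, n))
--     sufr.reverse()
--     return min(p - s for p, s in zip(pre, sufr))
-- ===== Notes on version B (the rewrite author's own statement) =====
-- stated objective: faster
-- what changed: Instead of re-sorting the whole prefix and suffix from scratch for every split point, B makes one incremental insertion pass from the left (maintaining the sorted prefix) and one from the right (maintaining the sorted suffix), records the n-smallest/n-largest sums along the way, and takes the min of the zipped differences.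
import Mathlib
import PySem

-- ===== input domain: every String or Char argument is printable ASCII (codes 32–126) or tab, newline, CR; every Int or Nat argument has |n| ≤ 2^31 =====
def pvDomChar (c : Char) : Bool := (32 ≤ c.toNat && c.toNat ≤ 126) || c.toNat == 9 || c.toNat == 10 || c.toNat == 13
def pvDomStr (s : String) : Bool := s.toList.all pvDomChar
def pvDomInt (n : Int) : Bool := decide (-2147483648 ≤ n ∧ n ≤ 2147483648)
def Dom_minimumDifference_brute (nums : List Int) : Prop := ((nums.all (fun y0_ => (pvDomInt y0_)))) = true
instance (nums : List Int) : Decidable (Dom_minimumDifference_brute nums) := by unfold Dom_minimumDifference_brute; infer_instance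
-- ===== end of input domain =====

-- B replaces A's per-split re-sorting by two incremental insertion passes (left prefix, right suffix); objective: faster.

-- ===== PORT A =====
-- answer = float('inf') is modelled as (none : Option Int); the loop range n..2n is never
-- empty, so the accumulator is always `some` after the loop and the final `.getD 0` is unreachable.
def minimumDifference_brute (nums : List Int) : Int :=
  let n : Int := PySem.Int.floordiv ((nums.length : Int)) 3
  ((PySem.List.pyRange n (2 * n + 1) 1).foldl (fun answer i =>
      let a := (PySem.List.slice (PySem.List.sorted (PySem.List.slice nums none (some i)) (fun x => x) false) none (some n)).sum
      let b := (PySem.List.slice (PySem.List.sorted (PySem.List.slice nums (some i) none) (fun x => x) true) none (some n)).sum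
      match answer with
      | none => some (a - b)
      | some v => some (Min.min v (a - b))) none).getD 0

-- ===== PORT B =====
-- port of Source B's _insert_sorted: insert x into the ascending-sorted xs (linear scan)
def insertSorted (xs : List Int) (x : Int) : List Int :=
  match xs with
  | [] => [x]
  | a :: t => if x < a then x :: a :: t else a :: insertSorted t x

-- port of Source B's _top_sum: sum of the last n entries (cur[len(cur)-n:])
def topSum (cur : List Int) (n : Nat) : Int := (cur.drop (cur.length - n)).sum

-- min(...) over the zipped lists: they have n+1 ≥ 1 entries, so min? is `some` and `.getD 0` is unreachable
def minimumDifference_brute_alt (nums : List Int) : Int :=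
  let n := nums.length / 3
  let cur0 := (nums.take n).foldl insertSorted []
  let p := ((nums.drop n).take n).foldl
      (fun st x => (insertSorted st.1 x, st.2 ++ [(st.1.take n).sum])) (cur0, ([] : List Int))
  let pre := p.2 ++ [(p.1.take n).sum]
  let cur2 := ((nums.drop (2 * n)).reverse).foldl insertSorted []
  let q := (((nums.drop n).take n).reverse).foldl
      (fun st x => let c := insertSorted st.1 x; (c, st.2 ++ [topSum c n])) (cur2, [topSum cur2 n])
  let suf := q.2.reverse
  (PySem.List.min? ((pre.zip suf).map (fun ps => ps.1 - ps.2)) (fun v => v)).getD 0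

-- ===== PRECONDITION & SPEC =====
def Spec_minimumDifference_brute (nums : List Int) (out : Int) : Prop := out = minimumDifference_brute_alt nums
instance (nums : List Int) (out : Int) : Decidable (Spec_minimumDifference_brute nums out) := by unfold Spec_minimumDifference_brute; infer_instance

-- ===== CLAIM (what is proved, stated in full; the proofs are below) =====
def Claim_equal_minimumDifference_brute : Prop := ∀ (nums : List Int), Dom_minimumDifference_brute nums → Spec_minimumDifference_brute nums (minimumDifference_brute nums)

-- ===== LEMMAS AND PROOFS =====

-- PySem.List.sorted with the identity key, ascending: the unique ≤-sorted permutation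
def sortL (l : List Int) : List Int := PySem.List.sorted l (fun x => x) false

-- value of A's `a` term at split index k: sum of the n smallest of nums[:k]
def aVal (nums : List Int) (k : Nat) : Int := ((sortL (nums.take k)).take (nums.length / 3)).sum
-- value of A's `b` term at split index k: sum of the n largest of nums[k:]
def bVal (nums : List Int) (k : Nat) : Int := topSum (sortL (nums.drop k)) (nums.length / 3)

theorem insertSorted_perm (xs : List Int) (x : Int) : (insertSorted xs x).Perm (x :: xs) := by
  induction xs with
  | nil => rfl
  | cons a t ih =>
    unfold insertSorted
    split
    · rfl
    · exact (ih.cons a).trans (List.Perm.swap x a t)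

theorem insertSorted_pairwise (xs : List Int) (x : Int) (h : xs.Pairwise (· ≤ ·)) :
    (insertSorted xs x).Pairwise (· ≤ ·) := by
  induction xs with
  | nil => simp [insertSorted]
  | cons a t ih =>
    rw [List.pairwise_cons] at h
    unfold insertSorted
    split
    · rename_i hx
      refine List.pairwise_cons.2 ⟨?_, List.pairwise_cons.2 ⟨h.1, h.2⟩⟩
      intro y hy
      rcases List.mem_cons.1 hy with rfl | hy
      · exact le_of_lt hx
      · exact le_trans (le_of_lt hx) (h.1 y hy)
    · rename_i hx
      refine List.pairwise_cons.2 ⟨?_, ih h.2⟩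
      intro y hy
      rcases List.mem_cons.1 (((insertSorted_perm t x).mem_iff).1 hy) with rfl | hy
      · exact le_of_not_gt hx
      · exact h.1 y hy

theorem foldl_insertSorted_perm (l s : List Int) : (l.foldl insertSorted s).Perm (s ++ l) := by
  induction l generalizing s with
  | nil => simp
  | cons x t ih =>
    simp only [List.foldl_cons]
    refine (ih (insertSorted s x)).trans ?_
    have h1 : (insertSorted s x ++ t).Perm ((x :: s) ++ t) :=
      (insertSorted_perm s x).append_right t
    refine h1.trans ?_
    simpa using List.perm_middle.symm

theorem foldl_insertSorted_pairwise (l s : List Int) (h : s.Pairwise (· ≤ ·)) :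
    (l.foldl insertSorted s).Pairwise (· ≤ ·) := by
  induction l generalizing s with
  | nil => exact h
  | cons x t ih => exact ih _ (insertSorted_pairwise s x h)

theorem foldl_insertSorted_eq (l s : List Int) (h : s.Pairwise (· ≤ ·)) :
    l.foldl insertSorted s = sortL (s ++ l) := by
  exact (PySem.List.sorted_id_eq_of_perm_of_pairwise _ _
    (foldl_insertSorted_perm l s) (foldl_insertSorted_pairwise l s h)).symm

theorem sortL_congr_perm (l1 l2 : List Int) (h : l1.Perm l2) : sortL l1 = sortL l2 :=
  PySem.List.sorted_eq_sorted_of_perm _ _ _ (fun _ _ h => h) h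

theorem sortedDesc_eq_reverse (l : List Int) :
    PySem.List.sorted l (fun x => x) true = (sortL l).reverse := by
  have hp : (PySem.List.sorted l (fun x => x) true).Perm ((sortL l).reverse) :=
    ((PySem.List.sorted_perm l (fun x => x) true).trans
      (PySem.List.sorted_perm l (fun x => x) false).symm).trans (List.reverse_perm _).symm
  exact hp.eq_of_pairwise (fun a b _ _ x y => le_antisymm y x)
    (by simpa using PySem.List.sorted_pairwise_rev (xs := l) (key := fun x => x))
    (by simpa [List.pairwise_reverse] using PySem.List.sorted_pairwise (xs := l) (key := fun x => x))

theorem sum_take_reverse (l : List Int) (n : Nat) : (l.reverse.take n).sum = topSum l n := by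
  rw [List.take_reverse, List.sum_reverse_int]; rfl

-- characterization of B's prefix loop
theorem preLoop (N : Nat) (l c acc : List Int) :
    l.foldl (fun st x => (insertSorted st.1 x, st.2 ++ [(st.1.take N).sum])) (c, acc)
      = (l.foldl insertSorted c,
         acc ++ (List.range l.length).map (fun j => (((l.take j).foldl insertSorted c).take N).sum)) := by
  induction l generalizing c acc with
  | nil => simp
  | cons x t ih =>
    simp only [List.foldl_cons, List.length_cons, List.range_succ_eq_map, List.map_cons,
      List.map_map]
    rw [ih]
    simp [Function.comp_def, List.append_assoc]

-- characterization of B's suffix loop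
theorem sufLoop (N : Nat) (l c acc : List Int) :
    l.foldl (fun st x => let c' := insertSorted st.1 x; (c', st.2 ++ [topSum c' N])) (c, acc)
      = (l.foldl insertSorted c,
         acc ++ (List.range l.length).map (fun j => topSum ((l.take (j+1)).foldl insertSorted c) N)) := by
  induction l generalizing c acc with
  | nil => simp
  | cons x t ih =>
    simp only [List.foldl_cons, List.length_cons, List.range_succ_eq_map, List.map_cons,
      List.map_map]
    rw [ih]
    simp [Function.comp_def, List.append_assoc]

-- A's running float-min loop with `none` as inf is Python's min of the value list
theorem foldlMin_some {α : Type} (l : List α) (v : α → Int) (a : Int) :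
    l.foldl (fun answer x => match answer with
      | none => some (v x)
      | some w => some (Min.min w (v x))) (some a) = some ((l.map v).foldl min a) := by
  induction l generalizing a with
  | nil => rfl
  | cons x t ih => simpa using ih (Min.min a (v x))

theorem foldlMin_none {α : Type} (l : List α) (v : α → Int) :
    l.foldl (fun answer x => match answer with
      | none => some (v x)
      | some w => some (Min.min w (v x))) none = PySem.List.min? (l.map v) (fun y => y) := by
  cases l with
  | nil => rfl
  | cons x t =>
    rw [List.map_cons, PySem.List.min?_id_cons]
    simpa using foldlMin_some t v (v x)

theorem revMapRange {α : Type} (n : Nat) (f : Nat → α) :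
    ((List.range n).map f).reverse = (List.range n).map (fun j => f (n - 1 - j)) := by
  refine List.ext_getElem (by simp) ?_
  intro i h1 h2
  simp only [List.length_reverse, List.length_map, List.length_range] at h1 h2
  rw [List.getElem_reverse]
  simp only [List.getElem_map, List.getElem_range, List.length_map, List.length_range]

theorem A_char (nums : List Int) :
    minimumDifference_brute nums =
      (PySem.List.min? ((List.range (nums.length / 3 + 1)).map
        (fun k => aVal nums (nums.length / 3 + k) - bVal nums (nums.length / 3 + k))) (fun v => v)).getD 0 := by
  set N := nums.length / 3 with hN
  have hn : PySem.Int.floordiv ((nums.length : Int)) 3 = ((N : Int)) := by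
    rw [hN]
    exact_mod_cast PySem.Int.floordiv_natCast nums.length 3
  have htn : (2 * (N : Int) + 1 - (N : Int)).toNat = N + 1 := by omega
  simp only [minimumDifference_brute, hn]
  rw [PySem.List.pyRange_one, htn, List.foldl_map]
  simp only [← Nat.cast_add, PySem.List.slice_to_natCast, PySem.List.slice_from_natCast,
    sortedDesc_eq_reverse, sum_take_reverse]
  rw [foldlMin_none]
  rfl

theorem B_char (nums : List Int) :
    minimumDifference_brute_alt nums =
      (PySem.List.min? ((List.range (nums.length / 3 + 1)).map
        (fun k => aVal nums (nums.length / 3 + k) - bVal nums (nums.length / 3 + k))) (fun v => v)).getD 0 := by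
  have hfold : ∀ p : List Int, p.foldl insertSorted [] = sortL p := fun p => by
    simpa using foldl_insertSorted_eq p [] (by simp)
  have hfold2 : ∀ (p q : List Int), q.foldl insertSorted (p.foldl insertSorted []) = sortL (p ++ q) := by
    intro p q
    rw [← List.foldl_append, hfold]
  set N := nums.length / 3 with hN
  have h3 : 3 * N ≤ nums.length := by omega
  have hseg : ((nums.drop N).take N).length = N := by
    simp only [List.length_take, List.length_drop]
    omega
  -- the prefix pass produces the aVal entries
  have hpre_entry : ∀ j, j ≤ N →
      ((((((nums.drop N).take N).take j).foldl insertSorted ((nums.take N).foldl insertSorted []))).take N).sum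
        = aVal nums (N + j) := by
    intro j hj
    rw [hfold2, List.take_take, min_eq_left hj]
    have ht : nums.take (N + j) = nums.take N ++ (nums.drop N).take j := List.take_add
    rw [← ht]
    simp only [aVal, ← hN]
  have hpre : (((nums.drop N).take N).foldl
        (fun st x => (insertSorted st.1 x, st.2 ++ [(st.1.take N).sum]))
        (((nums.take N).foldl insertSorted []), ([] : List Int))).2
        ++ [((((nums.drop N).take N).foldl
            (fun st x => (insertSorted st.1 x, st.2 ++ [(st.1.take N).sum]))
            (((nums.take N).foldl insertSorted []), ([] : List Int))).1.take N).sum]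
      = (List.range (N + 1)).map (fun k => aVal nums (N + k)) := by
    rw [preLoop, hseg]
    rw [List.range_succ, List.map_append]
    simp only [List.nil_append]
    congr 1
    · refine List.map_congr_left ?_
      intro j hj
      exact hpre_entry j (le_of_lt (List.mem_range.1 hj))
    · simp only [List.map_cons, List.map_nil]
      congr 1
      have : ((nums.drop N).take N) = ((nums.drop N).take N).take N := by
        rw [List.take_take, min_self]
      rw [this]
      exact hpre_entry N le_rfl
  -- cur2 is the sorted suffix
  have hcur2 : ((nums.drop (2 * N)).reverse).foldl insertSorted [] = sortL (nums.drop (2 * N)) := by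
    rw [hfold]
    exact sortL_congr_perm _ _ (List.reverse_perm _)
  -- the suffix pass produces the bVal entries (in reverse)
  have hsuf_entry : ∀ k, 0 < k → k ≤ N →
      ((((nums.drop N).take N).reverse.take k).foldl insertSorted
          (((nums.drop (2 * N)).reverse).foldl insertSorted []))
        = sortL (nums.drop (2 * N - k)) := by
    intro k hk0 hk
    rw [← List.foldl_append, hfold]
    refine sortL_congr_perm _ _ ?_
    have h1 : ((nums.drop N).take N).reverse.take k
        = (((nums.drop N).take N).drop (N - k)).reverse := by
      rw [List.take_reverse, hseg]
    have h2 : ((nums.drop N).take N).drop (N - k) = (nums.drop (2 * N - k)).take k := by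
      rw [List.drop_take, List.drop_drop]
      congr 1
      · omega
      · congr 1
        omega
    have h3' : nums.drop (2 * N) = (nums.drop (2 * N - k)).drop k := by
      rw [List.drop_drop]
      congr 1
      omega
    rw [h1, h2, h3']
    refine ((List.reverse_perm _).append (List.reverse_perm _)).trans ?_
    refine List.perm_append_comm.trans ?_
    rw [List.take_append_drop]
  have hsuf : (((((nums.drop N).take N).reverse).foldl
        (fun st x => let c := insertSorted st.1 x; (c, st.2 ++ [topSum c N]))
        (((nums.drop (2 * N)).reverse).foldl insertSorted [],
          [topSum (((nums.drop (2 * N)).reverse).foldl insertSorted []) N])).2).reverse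
      = (List.range (N + 1)).map (fun k => bVal nums (N + k)) := by
    rw [sufLoop]
    simp only [List.length_reverse, hseg]
    have hlist : [topSum (((nums.drop (2 * N)).reverse).foldl insertSorted []) N]
          ++ (List.range N).map (fun j =>
              topSum ((((nums.drop N).take N).reverse.take (j + 1)).foldl insertSorted
                (((nums.drop (2 * N)).reverse).foldl insertSorted [])) N)
        = (List.range (N + 1)).map (fun k => bVal nums (2 * N - k)) := by
      rw [List.range_succ_eq_map, List.map_cons, List.map_map]
      simp only [List.singleton_append]
      congr 1
      · rw [hcur2]
        simp only [Nat.sub_zero, bVal, ← hN]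
      · refine List.map_congr_left ?_
        intro j hj
        simp only [Function.comp_apply]
        rw [hsuf_entry (j + 1) (Nat.succ_pos j) (List.mem_range.1 hj)]
        simp only [bVal, ← hN]
    rw [hlist, revMapRange]
    refine List.map_congr_left ?_
    intro j hj
    have hjN : j ≤ N := Nat.lt_succ_iff.mp (List.mem_range.1 hj)
    congr 1
    omega
  simp only [minimumDifference_brute_alt, ← hN]
  rw [hpre, hsuf, List.zip_map', List.map_map]
  rfl

-- ===== VERDICT (by name: the statement is the Claim_ definition above) =====
theorem minimumDifference_brute_spec : Claim_equal_minimumDifference_brute := by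
  intro nums _
  unfold Spec_minimumDifference_brute
  rw [A_char, B_char]
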